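-- pv_equiv track=rewrite | github.com/shreyysk/GoCubes | utils/image_processor.py | validate_cube_state
-- ===== SOURCE A (Python) =====
-- from typing import Dict, List, Tuple
--
-- def validate_cube_state(cube_state: Dict[str, List[str]]) -> bool:
--     """
--     Validate that the cube state is physically possible
--     """
--     # Count occurrences of each color
--     color_count = {}
--
--     for face, colors in cube_state.items():
--         if len(colors) != 9:
--             return False
--
--         for color in colors:
--             color_count[color] = color_count.get(color, 0) + 1
--
--     # Each color should appear exactly 9 times
--     expected_colors = {'W', 'Y', 'R', 'O', 'G', 'B'}
--
--     if set(color_count.keys()) != expected_colors: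
--         return False
--
--     for color in expected_colors:
--         if color_count.get(color, 0) != 9:
--             return False
--
--     return True
-- ===== SOURCE B (Python) =====
-- _EXPECTED_SORTED = sorted(['W', 'Y', 'R', 'O', 'G', 'B'] * 9)
--
--
-- def validate_cube_state(cube_state):
--     """Validate the cube state by sorting: every face has 9 stickers and the
--     54 stickers form exactly the multiset of 9 of each of the six colors."""
--     if any(len(colors) != 9 for colors in cube_state.values()):
--         return False
--     flat = [c for colors in cube_state.values() for c in colors]
--     return sorted(flat) == _EXPECTED_SORTED
-- ===== Notes on version B (the rewrite author's own statement) =====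
-- stated objective: simpler
-- what changed: Replaces the running-count dict plus key-set comparison plus per-color count loop with a length guard followed by a single sort-and-compare against the fixed sorted 54-sticker multiset.
import Mathlib
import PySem

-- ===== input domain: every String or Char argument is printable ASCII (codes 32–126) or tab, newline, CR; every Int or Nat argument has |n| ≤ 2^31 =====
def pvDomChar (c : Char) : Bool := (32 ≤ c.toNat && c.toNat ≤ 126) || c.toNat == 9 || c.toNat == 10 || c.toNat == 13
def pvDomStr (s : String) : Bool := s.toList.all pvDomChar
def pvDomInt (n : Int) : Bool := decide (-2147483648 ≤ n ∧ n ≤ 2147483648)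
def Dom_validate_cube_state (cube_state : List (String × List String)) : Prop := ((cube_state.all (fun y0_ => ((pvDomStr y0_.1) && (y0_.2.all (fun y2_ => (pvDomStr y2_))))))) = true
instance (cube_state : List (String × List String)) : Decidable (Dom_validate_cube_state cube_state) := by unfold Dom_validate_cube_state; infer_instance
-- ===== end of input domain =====

-- B replaces A's running-count dict + key-set check + per-color count loop by a
-- length guard plus a single sort-and-compare against the fixed sorted multiset (objective: simpler).


-- ===== PORT A =====
-- the inner 'for color in colors' counting loop: color_count[color] = color_count.get(color, 0) + 1
def pvCountFace (d : PySem.Dict String Int) (colors : List String) : PySem.Dict String Int :=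
  colors.foldl (fun d c => d.insert c (d.getD c 0 + 1)) d

-- the outer 'for face, colors in cube_state.items()' loop; none = the early 'return False'
def pvLoopA (d : PySem.Dict String Int) : List (String × List String) → Option (PySem.Dict String Int)
  | [] => some d
  | (_, colors) :: rest =>
      if colors.length ≠ 9 then none
      else pvLoopA (pvCountFace d colors) rest

def pvExpected : PySem.Set String := PySem.Set.ofList ["W", "Y", "R", "O", "G", "B"]

def validate_cube_state (cube_state : List (String × List String)) : Bool :=
  match pvLoopA PySem.Dict.empty cube_state with
  | none => false
  | some color_count =>
      if ¬ (PySem.Set.equal (PySem.Set.ofList color_count.keys) pvExpected) then false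
      -- 'for color in expected_colors' iterates a set; the all-counts-are-9 test is order-independent
      else if pvExpected.any (fun color => ¬ (color_count.getD color 0 == 9)) then false
      else true

-- ===== PORT B =====
-- Python's sorted() on str orders by code points = the lexicographic order on s.toList (PYSEM);
-- exact on the ASCII domain (and beyond): sort with key s.toList
def pvSortStrs (xs : List String) : List String :=
  @PySem.List.sorted String (List Char) LinearOrder.toPartialOrder.toLT
    (fun a b => a.decidableLT b) xs (fun x => x.toList) false

-- _EXPECTED_SORTED = sorted(['W','Y','R','O','G','B'] * 9)
def pvExpectedSorted : List String :=
  pvSortStrs (List.flatten (List.replicate 9 ["W", "Y", "R", "O", "G", "B"]))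

def validate_cube_state_alt (cube_state : List (String × List String)) : Bool :=
  if cube_state.any (fun f => f.2.length ≠ 9) then false
  else pvSortStrs (cube_state.flatMap (fun f => f.2)) == pvExpectedSorted

-- ===== PRECONDITION & SPEC =====
def Spec_validate_cube_state (cube_state : List (String × List String)) (out : Bool) : Prop := out = validate_cube_state_alt cube_state
instance (cube_state : List (String × List String)) (out : Bool) : Decidable (Spec_validate_cube_state cube_state out) := by unfold Spec_validate_cube_state; infer_instance

-- ===== CLAIM (what is proved, stated in full; the proofs are below) =====
def Claim_equal_validate_cube_state : Prop := ∀ (cube_state : List (String × List String)), Dom_validate_cube_state cube_state → Spec_validate_cube_state cube_state (validate_cube_state cube_state)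

-- ===== LEMMAS AND PROOFS =====

-- the sorted target as an explicit literal
def pvTargetLit : List String :=
  List.replicate 9 "B" ++ List.replicate 9 "G" ++ List.replicate 9 "O" ++
  List.replicate 9 "R" ++ List.replicate 9 "W" ++ List.replicate 9 "Y"

theorem pvExpectedSorted_eq : pvExpectedSorted = pvTargetLit := by decide

theorem pvLoopA_none (cs : List (String × List String)) (d : PySem.Dict String Int) :
    pvLoopA d cs = none ↔ (cs.any fun f => f.2.length ≠ 9) = true := by
  induction cs generalizing d with
  | nil => simp [pvLoopA]
  | cons hd tl ih =>
      obtain ⟨f, colors⟩ := hd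
      by_cases h : colors.length = 9 <;> simp [pvLoopA, h, ih]

theorem pvLoopA_some (cs : List (String × List String)) (d : PySem.Dict String Int)
    (h : (cs.all fun f => f.2.length = 9) = true) :
    pvLoopA d cs = some ((cs.flatMap (fun f => f.2)).foldl (fun d c => d.insert c (d.getD c 0 + 1)) d) := by
  induction cs generalizing d with
  | nil => simp [pvLoopA]
  | cons hd tl ih =>
      obtain ⟨f, colors⟩ := hd
      simp only [List.all_cons, Bool.and_eq_true, decide_eq_true_eq] at h
      simp [pvLoopA, h.1, ih _ (by simpa using h.2), pvCountFace, List.foldl_append]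

theorem pvTarget_count (c : String) (hc : c ∈ ["W", "Y", "R", "O", "G", "B"]) :
    pvTargetLit.count c = 9 := by
  fin_cases hc <;> decide

theorem pvTarget_mem (c : String) : c ∈ pvTargetLit ↔ c ∈ ["W", "Y", "R", "O", "G", "B"] := by
  simp [pvTargetLit]
  constructor
  · rintro (h | h | h | h | h | h) <;> simp [h]
  · rintro (h | h | h | h | h | h) <;> simp [h]

theorem pvTarget_pairwise : pvTargetLit.Pairwise (fun a b : String => a.toList ≤ b.toList) := by
  decide

theorem pvKeyAntisymm : ∀ (a b : String), a.toList ≤ b.toList → b.toList ≤ a.toList → a = b :=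
  fun _ _ h1 h2 => String.toList_injective (le_antisymm h1 h2)

-- multiset characterisation: right members + count 9 each ⟺ the sorted list is the fixed target
theorem pvMain (flat : List String) :
    ((∀ x, x ∈ flat ↔ x ∈ ["W", "Y", "R", "O", "G", "B"]) ∧
      (∀ c ∈ ["W", "Y", "R", "O", "G", "B"], flat.count c = 9)) ↔
    pvSortStrs flat = pvTargetLit := by
  constructor
  · rintro ⟨hmem, hcount⟩
    have hperm : pvTargetLit.Perm flat := by
      rw [List.perm_iff_count]
      intro a
      by_cases ha : a ∈ ["W", "Y", "R", "O", "G", "B"]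
      · rw [pvTarget_count a ha, hcount a ha]
      · rw [List.count_eq_zero.mpr (fun h => ha ((pvTarget_mem a).mp h)),
            List.count_eq_zero.mpr (fun h => ha ((hmem a).mp h))]
    have hsp : (pvSortStrs flat).Pairwise (fun a b : String => a.toList ≤ b.toList) := by
      unfold pvSortStrs
      rw [show (fun (a b : List Char) => a.decidableLT b) = (LinearOrder.toDecidableLT : DecidableLT (List Char)) from
            funext fun a => funext fun b => Subsingleton.elim _ _]
      exact PySem.List.sorted_pairwise flat (fun x => x.toList)
    have hp2 : (pvSortStrs flat).Perm pvTargetLit :=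
      (PySem.List.sorted_perm flat _ false).trans hperm.symm
    exact @List.Perm.eq_of_pairwise' String _ ⟨pvKeyAntisymm⟩ _ _ hsp pvTarget_pairwise hp2
  · intro hs
    have hperm : flat.Perm pvTargetLit := by
      have h : (pvSortStrs flat).Perm flat := PySem.List.sorted_perm flat _ false
      rw [hs] at h
      exact h.symm
    refine ⟨fun x => ?_, fun c hc => ?_⟩
    · rw [hperm.mem_iff, pvTarget_mem]
    · rw [hperm.count_eq, pvTarget_count c hc]

-- A's two dict checks, as Booleans, ⟺ the multiset characterisation
theorem pvChecks (flat : List String) :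
    (PySem.Set.equal (PySem.Set.ofList (PySem.Dict.counter flat).keys) pvExpected = true ∧
      (List.any pvExpected fun color => decide ¬((PySem.Dict.counter flat).getD color 0 == 9)) = false)
    ↔ ((∀ x, x ∈ flat ↔ x ∈ ["W", "Y", "R", "O", "G", "B"]) ∧
        (∀ c ∈ ["W", "Y", "R", "O", "G", "B"], flat.count c = 9)) := by
  rw [PySem.Set.equal_iff]
  constructor
  · rintro ⟨hk, hc⟩
    refine ⟨fun x => ?_, fun c hcmem => ?_⟩
    · have h := hk x
      rw [PySem.Set.mem_ofList, PySem.Dict.keys_counter, PySem.Set.mem_ofList] at h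
      simpa [pvExpected, PySem.Set.mem_ofList] using h
    · simp only [List.any_eq_false] at hc
      have := hc c (by simpa [pvExpected, PySem.Set.mem_ofList] using hcmem)
      simp [PySem.Dict.getD_counter] at this
      omega
  · rintro ⟨hmem, hcount⟩
    constructor
    · intro x
      rw [PySem.Set.mem_ofList, PySem.Dict.keys_counter, PySem.Set.mem_ofList]
      simpa [pvExpected, PySem.Set.mem_ofList] using hmem x
    · simp only [List.any_eq_false]
      intro c hcmem
      have hce : c ∈ ["W", "Y", "R", "O", "G", "B"] := by
        simpa [pvExpected, PySem.Set.mem_ofList] using hcmem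
      simp [PySem.Dict.getD_counter, hcount c hce]

-- ===== VERDICT (by name: the statement is the Claim_ definition above) =====
theorem validate_cube_state_spec : Claim_equal_validate_cube_state := by
  unfold Claim_equal_validate_cube_state
  intro cs _
  unfold Spec_validate_cube_state validate_cube_state validate_cube_state_alt
  by_cases hbad : (cs.any fun f => f.2.length ≠ 9) = true
  · rw [(pvLoopA_none cs PySem.Dict.empty).mpr hbad, hbad]
    rfl
  · have hall : (cs.all fun f => f.2.length = 9) = true := by
      rw [Bool.not_eq_true] at hbad
      rw [List.all_eq_true]
      intro f hf
      rw [List.any_eq_false] at hbad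
      simpa using hbad f hf
    rw [Bool.not_eq_true] at hbad
    rw [pvLoopA_some cs PySem.Dict.empty hall, PySem.Dict.foldl_insert_getD_add_one_eq_counter,
        hbad, pvExpectedSorted_eq]
    set flat := cs.flatMap (fun f => f.2) with hflat
    simp only [Bool.false_eq_true]
    rw [if_neg not_false]
    by_cases hkeys : PySem.Set.equal (PySem.Set.ofList (PySem.Dict.counter flat).keys) pvExpected = true
    · by_cases hcnt :
        (List.any pvExpected fun color => decide ¬((PySem.Dict.counter flat).getD color 0 == 9)) = true
      · -- some count ≠ 9: both sides false
        have hne : pvSortStrs flat ≠ pvTargetLit := by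
          intro hsort
          have h := (pvChecks flat).mpr ((pvMain flat).mpr hsort)
          rw [h.2] at hcnt
          exact Bool.noConfusion hcnt
        rw [if_neg (not_not_intro hkeys), if_pos hcnt]
        exact (beq_eq_false_iff_ne.mpr hne).symm
      · -- all checks pass: both sides true
        rw [Bool.not_eq_true] at hcnt
        have heq : pvSortStrs flat = pvTargetLit :=
          (pvMain flat).mp ((pvChecks flat).mp ⟨hkeys, hcnt⟩)
        rw [if_neg (not_not_intro hkeys), if_neg (fun h => Bool.noConfusion (hcnt ▸ h))]
        exact (beq_iff_eq.mpr heq).symm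
    · -- key sets differ: both sides false
      rw [Bool.not_eq_true] at hkeys
      have hne : pvSortStrs flat ≠ pvTargetLit := by
        intro hsort
        have h := (pvChecks flat).mpr ((pvMain flat).mpr hsort)
        rw [h.1] at hkeys
        exact Bool.noConfusion hkeys
      have hc : ¬ (PySem.Set.ofList (PySem.Dict.counter flat).keys).equal pvExpected = true := by
        rw [hkeys]; exact Bool.false_ne_true
      rw [if_pos hc]
      exact (beq_eq_false_iff_ne.mpr hne).symm
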